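-- pv_equiv track=rewrite | github.com/MicheleSpecchia/probity | src/pmx/jobs/smoke_pipeline_artifact_only.py | _normalize_warnings
-- ===== SOURCE A (Python) =====
-- from collections.abc import Mapping, Sequence
-- from typing import Any, cast
--
-- def _normalize_warnings(raw_warnings: Sequence[Mapping[str, str]]) -> list[dict[str, str]]:
--     deduped: dict[tuple[str, str, str], dict[str, str]] = {}
--     for warning in raw_warnings:
--         code = _optional_text(warning.get("code")) or "unknown_warning"
--         message = _optional_text(warning.get("message")) or ""
--         source = _optional_text(warning.get("source")) or "smoke"
--         deduped[(code, message, source)] = {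
--             "code": code,
--             "message": message,
--             "source": source,
--         }
--     keys = sorted(deduped.keys(), key=lambda item: item)
--     return [deduped[key] for key in keys]
--
-- def _optional_text(raw: Any) -> str | None:
--     if raw is None:
--         return None
--     value = str(raw).strip()
--     return value or None
-- ===== SOURCE B (Python) =====
-- def _normalize_warnings(raw_warnings):
--     result = []  # sorted, duplicate-free list of normalized triples, maintained incrementally
--     for warning in raw_warnings:
--         code = _optional_text(warning.get("code")) or "unknown_warning"
--         message = _optional_text(warning.get("message")) or ""
--         source = _optional_text(warning.get("source")) or "smoke"
--         result = _insert_unique((code, message, source), result)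
--     return [{"code": c, "message": m, "source": s} for (c, m, s) in result]
--
--
-- def _insert_unique(t, sorted_list):
--     # ordered insertion into a sorted list, dropping t if already present
--     if not sorted_list:
--         return [t]
--     head = sorted_list[0]
--     if head < t:
--         return [head] + _insert_unique(t, sorted_list[1:])
--     if head == t:
--         return sorted_list
--     return [t] + sorted_list
--
--
-- def _optional_text(raw):
--     if raw is None:
--         return None
--     value = str(raw).strip()
--     return value or None
-- ===== Notes on version B (the rewrite author's own statement) =====
-- stated objective: alternative
-- what changed: Replaces A's dict-keyed dedup followed by a batch sort of the keys with a single pass that maintains a sorted duplicate-free list of normalized triples via ordered insertion (insertion sort with dedup); no dict and no sort call.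
import Mathlib
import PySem

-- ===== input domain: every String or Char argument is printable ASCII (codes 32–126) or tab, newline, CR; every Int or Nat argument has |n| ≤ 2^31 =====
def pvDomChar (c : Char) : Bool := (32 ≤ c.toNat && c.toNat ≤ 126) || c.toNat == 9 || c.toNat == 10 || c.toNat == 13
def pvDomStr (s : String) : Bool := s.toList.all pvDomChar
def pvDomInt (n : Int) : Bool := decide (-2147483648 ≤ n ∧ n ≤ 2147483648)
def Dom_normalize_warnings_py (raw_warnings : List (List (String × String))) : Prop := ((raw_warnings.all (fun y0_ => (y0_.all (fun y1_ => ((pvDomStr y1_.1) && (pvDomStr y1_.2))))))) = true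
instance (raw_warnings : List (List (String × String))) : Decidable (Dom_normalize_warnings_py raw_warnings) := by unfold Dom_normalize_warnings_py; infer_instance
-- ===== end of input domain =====

-- B replaces A's dict-keyed dedup + batch key sort by one pass that maintains a sorted
-- duplicate-free list of normalized triples via ordered insertion; equal return value
-- on every input (neither version mutates its argument).

-- ===== PORT A =====
-- _optional_text: the inputs are str values, so str(raw) is the identity; strip, then '' -> None.
def optional_text (raw : Option String) : Option String :=
  match raw with
  | none => none
  | some s =>
    let value := PySem.Str.strip s
    if value = "" then none else some value

-- the normalized (code, message, source) triple of one warning ('x or default' with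
-- _optional_text never returning "" is Option.getD)
def pvNorm (warning : List (String × String)) : String × String × String :=
  ((optional_text (PySem.Dict.get? ⟨warning⟩ "code")).getD "unknown_warning",
   (optional_text (PySem.Dict.get? ⟨warning⟩ "message")).getD "",
   (optional_text (PySem.Dict.get? ⟨warning⟩ "source")).getD "smoke")

-- the {"code": …, "message": …, "source": …} dict of a triple
def pvDict (t : String × String × String) : List (String × String) :=
  [("code", t.1), ("message", t.2.1), ("source", t.2.2)]

-- Python's '<' on (str, str, str) tuples: lexicographic, exact on these triples
def pvLt (a b : String × String × String) : Bool :=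
  decide (a.1 < b.1) || (decide (a.1 = b.1) &&
    (decide (a.2.1 < b.2.1) || (decide (a.2.1 = b.2.1) && decide (a.2.2 < b.2.2))))

-- Python's sorted() on the tuple keys, ported by hand (PySem.List.sorted's key order is
-- not evaluable for tuples): a stable insertion sort driven by pvLt — exact, since pvLt
-- is Python's tuple comparison and the ascending order it yields is sorted()'s
def pvInsert (x : String × String × String) :
    List (String × String × String) → List (String × String × String)
  | [] => [x]
  | h :: t => if pvLt x h then x :: h :: t else h :: pvInsert x t

def pvSort (l : List (String × String × String)) : List (String × String × String) :=
  l.foldr pvInsert []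

def normalize_warnings_py (raw_warnings : List (List (String × String))) : List (List (String × String)) :=
  let deduped : PySem.Dict (String × String × String) (List (String × String)) :=
    raw_warnings.foldl (fun d warning =>
      let t := pvNorm warning
      d.insert t (pvDict t)) PySem.Dict.empty
  let keys := pvSort deduped.keys
  -- deduped[key]: key ∈ keys, so get? is always some; getD [] is never the default branch
  keys.map (fun k => (deduped.get? k).getD [])

-- ===== PORT B =====
-- _insert_unique: ordered insertion into a sorted list, dropping t if already present
def pvInsertUnique (t : String × String × String) :
    List (String × String × String) → List (String × String × String)
  | [] => [t]
  | head :: rest =>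
    if pvLt head t then head :: pvInsertUnique t rest
    else if head = t then head :: rest
    else t :: head :: rest

def normalize_warnings_py_alt (raw_warnings : List (List (String × String))) : List (List (String × String)) :=
  (raw_warnings.foldl (fun result warning => pvInsertUnique (pvNorm warning) result) []).map pvDict

-- ===== PRECONDITION & SPEC =====
def Spec_normalize_warnings_py (raw_warnings : List (List (String × String))) (out : List (List (String × String))) : Prop := out = normalize_warnings_py_alt raw_warnings
instance (raw_warnings : List (List (String × String))) (out : List (List (String × String))) : Decidable (Spec_normalize_warnings_py raw_warnings out) := by unfold Spec_normalize_warnings_py; infer_instance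

-- ===== CLAIM (what is proved, stated in full; the proofs are below) =====
def Claim_equal_normalize_warnings_py : Prop := ∀ (raw_warnings : List (List (String × String))), Dom_normalize_warnings_py raw_warnings → Spec_normalize_warnings_py raw_warnings (normalize_warnings_py raw_warnings)

-- ===== LEMMAS AND PROOFS =====

-- proof-side view of pvLt: the lexicographic order on String × String × String
def pvKey (t : String × String × String) : Lex (String × Lex (String × String)) :=
  toLex (t.1, toLex (t.2.1, t.2.2))

theorem pvKeyInj : Function.Injective pvKey := by
  intro a b h
  simp only [pvKey, toLex_inj, Prod.mk.injEq] at h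
  obtain ⟨h1, h2, h3⟩ := h
  exact Prod.ext h1 (Prod.ext h2 h3)

theorem pvLtIff (a b : String × String × String) : pvLt a b = true ↔ pvKey a < pvKey b := by
  simp only [pvLt, pvKey, Bool.or_eq_true, Bool.and_eq_true, decide_eq_true_eq,
    Prod.Lex.lt_iff]
  tauto

theorem pvNotLt (a b : String × String × String) (h : ¬ pvLt a b = true) :
    pvKey b ≤ pvKey a := le_of_not_gt (fun hl => h ((pvLtIff a b).mpr hl))

-- generic Dict facts (A side)
theorem pvContainsIffMemKeys {κ ν : Type} [BEq κ] [LawfulBEq κ] (d : PySem.Dict κ ν) (k : κ) :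
    d.contains k = true ↔ k ∈ d.keys := by
  simp only [PySem.Dict.contains, PySem.Dict.keys, List.any_eq_true, List.mem_map]
  constructor
  · rintro ⟨p, hp, he⟩; exact ⟨p, hp, beq_iff_eq.mp he⟩
  · rintro ⟨p, hp, he⟩; exact ⟨p, hp, beq_iff_eq.mpr he⟩

theorem pvKeysInsert {κ ν : Type} [BEq κ] [LawfulBEq κ] (d : PySem.Dict κ ν) (k : κ) (v : ν) :
    (d.insert k v).keys = if d.contains k then d.keys else d.keys ++ [k] := by
  simp only [PySem.Dict.insert]
  split
  · simp only [PySem.Dict.keys, List.map_map]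
    apply List.map_congr_left
    intro p hp
    by_cases h : p.1 = k
    · simp [h]
    · simp [beq_eq_false_iff_ne.mpr h]
  · simp [PySem.Dict.keys]

theorem pvMemItemsInsert {κ ν : Type} [BEq κ] [LawfulBEq κ] (d : PySem.Dict κ ν) (k : κ) (v : ν)
    (p : κ × ν) (hp : p ∈ (d.insert k v).items) : p = (k, v) ∨ p ∈ d.items := by
  simp only [PySem.Dict.insert] at hp
  split at hp
  · simp only [List.mem_map] at hp
    obtain ⟨q, hq, he⟩ := hp
    by_cases h : q.1 = k
    · left; rw [← he]; simp [h]
    · right; rw [← he]; simpa [beq_eq_false_iff_ne.mpr h] using hq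
  · simp only [List.mem_append, List.mem_singleton] at hp
    rcases hp with h | h
    · right; exact h
    · left; exact h

theorem pvGetOfMemKeys {κ ν : Type} [BEq κ] [LawfulBEq κ] (d : PySem.Dict κ ν) (k : κ) (f : κ → ν)
    (hv : ∀ p ∈ d.items, p.2 = f p.1) (hk : k ∈ d.keys) : d.get? k = some (f k) := by
  simp only [PySem.Dict.keys, List.mem_map] at hk
  obtain ⟨q, hq, he⟩ := hk
  have hs : (d.items.find? (fun p => p.1 == k)).isSome := List.find?_isSome.mpr ⟨q, hq, by simp [he]⟩
  obtain ⟨p, hp⟩ := Option.isSome_iff_exists.mp hs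
  have hmem := List.mem_of_find?_eq_some hp
  have hpk : p.1 = k := by
    have := List.find?_some hp
    exact beq_iff_eq.mp this
  simp [PySem.Dict.get?, hp, hv p hmem, hpk]

-- the A-side fold
theorem pvFoldVals (l : List (List (String × String)))
    (d : PySem.Dict (String × String × String) (List (String × String)))
    (hv : ∀ p ∈ d.items, p.2 = pvDict p.1) :
    ∀ p ∈ (l.foldl (fun d w => d.insert (pvNorm w) (pvDict (pvNorm w))) d).items, p.2 = pvDict p.1 := by
  induction l generalizing d with
  | nil => exact hv
  | cons w l ih =>
    refine ih _ ?_
    intro p hp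
    rcases pvMemItemsInsert _ _ _ p hp with h | h
    · rw [h]
    · exact hv p h

theorem pvFoldKeysMem (l : List (List (String × String)))
    (d : PySem.Dict (String × String × String) (List (String × String))) (k : String × String × String) :
    k ∈ (l.foldl (fun d w => d.insert (pvNorm w) (pvDict (pvNorm w))) d).keys ↔
      k ∈ d.keys ∨ k ∈ l.map pvNorm := by
  induction l generalizing d with
  | nil => simp
  | cons w l ih =>
    simp only [List.foldl_cons, ih, pvKeysInsert, List.map_cons, List.mem_cons]
    split
    · rename_i h
      rw [pvContainsIffMemKeys] at h
      constructor
      · rintro (h' | h') <;> tauto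
      · rintro (h' | h' | h')
        · exact Or.inl h'
        · exact Or.inl (by rw [h']; exact h)
        · exact Or.inr h'
    · simp only [List.mem_append, List.mem_singleton]
      tauto

theorem pvFoldKeysNodup (l : List (List (String × String)))
    (d : PySem.Dict (String × String × String) (List (String × String)))
    (hn : d.keys.Nodup) :
    (l.foldl (fun d w => d.insert (pvNorm w) (pvDict (pvNorm w))) d).keys.Nodup := by
  induction l generalizing d with
  | nil => exact hn
  | cons w l ih =>
    refine ih _ ?_
    rw [pvKeysInsert]
    split
    · exact hn
    · rename_i h
      rw [List.nodup_append]
      refine ⟨hn, List.nodup_singleton _, ?_⟩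
      intro x hx y hy
      rw [List.mem_singleton] at hy
      subst hy
      intro he
      rw [pvContainsIffMemKeys] at h
      exact h (he ▸ hx)

-- the hand-ported insertion sort: a permutation, ascending in pvKey
theorem pvInsertPerm (x : String × String × String) (l : List (String × String × String)) :
    (pvInsert x l).Perm (x :: l) := by
  induction l with
  | nil => simp [pvInsert]
  | cons h t ih =>
    simp only [pvInsert]
    split
    · exact List.Perm.refl _
    · exact ((ih.cons h).trans (List.Perm.swap x h t))

theorem pvInsertSorted (x : String × String × String) (l : List (String × String × String))
    (hl : l.Pairwise (fun a b => pvKey a ≤ pvKey b)) :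
    (pvInsert x l).Pairwise (fun a b => pvKey a ≤ pvKey b) := by
  induction l with
  | nil => simp [pvInsert]
  | cons h t ih =>
    obtain ⟨hh, ht⟩ := List.pairwise_cons.mp hl
    simp only [pvInsert]
    split
    · rename_i hlt
      refine List.pairwise_cons.mpr ⟨?_, hl⟩
      intro y hy
      rcases List.mem_cons.mp hy with he | hm
      · exact he ▸ le_of_lt ((pvLtIff x h).mp hlt)
      · exact le_trans (le_of_lt ((pvLtIff x h).mp hlt)) (hh y hm)
    · rename_i hnlt
      refine List.pairwise_cons.mpr ⟨?_, ih ht⟩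
      intro y hy
      have : y ∈ x :: t := (pvInsertPerm x t).mem_iff.mp hy
      rcases List.mem_cons.mp this with he | hm
      · exact he ▸ pvNotLt x h hnlt
      · exact hh y hm

theorem pvSortPerm (l : List (String × String × String)) : (pvSort l).Perm l := by
  induction l with
  | nil => simp [pvSort]
  | cons h t ih =>
    exact (pvInsertPerm h (pvSort t)).trans (ih.cons h)

theorem pvSortSorted (l : List (String × String × String)) :
    (pvSort l).Pairwise (fun a b => pvKey a ≤ pvKey b) := by
  induction l with
  | nil => simp [pvSort]
  | cons h t ih => exact pvInsertSorted h (pvSort t) ih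

-- B side: membership through pvInsertUnique (unconditional)
theorem pvMemInsertUnique (t x : String × String × String) (l : List (String × String × String)) :
    x ∈ pvInsertUnique t l ↔ x = t ∨ x ∈ l := by
  induction l with
  | nil => simp [pvInsertUnique]
  | cons h rest ih =>
    simp only [pvInsertUnique]
    split
    · simp only [List.mem_cons, ih]; tauto
    · split
      · rename_i he
        subst he
        simp only [List.mem_cons]; tauto
      · simp only [List.mem_cons]

-- B side: pvInsertUnique preserves strict pvKey-sortedness
theorem pvInsertUniqueSorted (t : String × String × String) (l : List (String × String × String))
    (hl : l.Pairwise (fun a b => pvKey a < pvKey b)) :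
    (pvInsertUnique t l).Pairwise (fun a b => pvKey a < pvKey b) := by
  induction l with
  | nil => simp [pvInsertUnique]
  | cons h rest ih =>
    obtain ⟨hh, hrest⟩ := List.pairwise_cons.mp hl
    simp only [pvInsertUnique]
    split
    · rename_i hlt
      refine List.pairwise_cons.mpr ⟨?_, ih hrest⟩
      intro x hx
      rcases (pvMemInsertUnique t x rest).mp hx with he | hm
      · exact he ▸ (pvLtIff h t).mp hlt
      · exact hh x hm
    · split
      · exact hl
      · rename_i hnlt hne
        have hth : pvKey t < pvKey h :=
          lt_of_le_of_ne (pvNotLt h t hnlt) (fun e => hne ((pvKeyInj e).symm))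
        refine List.pairwise_cons.mpr ⟨?_, hl⟩
        intro x hx
        rcases List.mem_cons.mp hx with he | hm
        · exact he ▸ hth
        · exact lt_trans hth (hh x hm)

-- B side: the fold builds a strictly sorted list whose members are the normalized triples
theorem pvFoldB (l : List (List (String × String))) (acc : List (String × String × String))
    (hacc : acc.Pairwise (fun a b => pvKey a < pvKey b)) :
    (l.foldl (fun r w => pvInsertUnique (pvNorm w) r) acc).Pairwise (fun a b => pvKey a < pvKey b) ∧
    (∀ x, x ∈ l.foldl (fun r w => pvInsertUnique (pvNorm w) r) acc ↔ x ∈ acc ∨ x ∈ l.map pvNorm) := by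
  induction l generalizing acc with
  | nil => exact ⟨hacc, by simp⟩
  | cons w l ih =>
    obtain ⟨h1, h2⟩ := ih (pvInsertUnique (pvNorm w) acc) (pvInsertUniqueSorted _ _ hacc)
    refine ⟨h1, ?_⟩
    intro x
    rw [List.foldl_cons] at *
    rw [h2 x, pvMemInsertUnique]
    simp only [List.map_cons, List.mem_cons]
    tauto

-- ===== VERDICT (by name: the statement is the Claim_ definition above) =====
theorem normalize_warnings_py_spec : Claim_equal_normalize_warnings_py := by
  intro raw _
  show normalize_warnings_py raw = normalize_warnings_py_alt raw
  unfold normalize_warnings_py normalize_warnings_py_alt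
  set D := raw.foldl (fun d warning => let t := pvNorm warning; d.insert t (pvDict t)) PySem.Dict.empty with hD
  have hDe : D = raw.foldl (fun d w => d.insert (pvNorm w) (pvDict (pvNorm w))) PySem.Dict.empty := rfl
  have hvals : ∀ p ∈ D.items, p.2 = pvDict p.1 := by
    rw [hDe]; exact pvFoldVals raw _ (by simp [PySem.Dict.empty])
  have hkeysmem : ∀ k, k ∈ D.keys ↔ k ∈ raw.map pvNorm := by
    intro k
    rw [hDe, pvFoldKeysMem]
    simp [PySem.Dict.empty, PySem.Dict.keys]
  have hnodup : D.keys.Nodup := by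
    rw [hDe]; exact pvFoldKeysNodup raw _ (by simp [PySem.Dict.empty, PySem.Dict.keys])
  -- the A side is pvDict mapped over the sorted key list
  have hA : (pvSort D.keys).map (fun k => (D.get? k).getD [])
      = (pvSort D.keys).map pvDict := by
    apply List.map_congr_left
    intro k hk
    rw [pvGetOfMemKeys D k pvDict hvals ((pvSortPerm D.keys).mem_iff.mp hk)]
    rfl
  rw [hA]
  -- both underlying lists are strictly pvKey-increasing with the same members, hence equal
  set L1 := pvSort D.keys with hL1
  set R := raw.foldl (fun r w => pvInsertUnique (pvNorm w) r) [] with hR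
  obtain ⟨hRsort, hRmem⟩ := pvFoldB raw [] (List.Pairwise.nil)
  have hL1nodup : L1.Nodup := (pvSortPerm D.keys).nodup_iff.mpr hnodup
  have hL1le : L1.Pairwise (fun a b => pvKey a ≤ pvKey b) := pvSortSorted D.keys
  have hRnodup : R.Nodup :=
    hRsort.imp (fun h => fun e => absurd (e ▸ h) (lt_irrefl _))
  have hmem : ∀ x, x ∈ L1 ↔ x ∈ R := by
    intro x
    rw [hL1, (pvSortPerm D.keys).mem_iff, hkeysmem, hRmem x]
    simp
  have hperm : L1.Perm R := (List.perm_ext_iff_of_nodup hL1nodup hRnodup).mpr hmem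
  have heq : L1 = R :=
    PySem.List.eq_of_perm_of_pairwise_le_of_injective pvKey pvKeyInj hperm hL1le
      (hRsort.imp le_of_lt)
  rw [heq]
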